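-- pv_equiv track=rewrite | github.com/jereneal20/competitive-programming | hackercup/2018-qual/tourist.py | tourist
-- ===== SOURCE A (Python) =====
-- def tourist(k, v, attractions):
--     ret_list = []
--     start_attr_num = (k * (v - 1)) % len(attractions)
--     i = 0
--     tmp_idx_list = []
--     while i < k:
--         tmp_idx_list.append((i + start_attr_num) % len(attractions))
--         i += 1
--     tmp_idx_list.sort()
--     for idx in tmp_idx_list:
--         ret_list.append(attractions[idx])
--     return ret_list
-- ===== SOURCE B (Python) =====
-- def tourist(k, v, attractions):
--     # Counting construction (no sort): for each attraction index r, compute directly how many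
--     # of the k visited indices equal r, and emit the attractions in index order.
--     n = len(attractions)
--     start = (k * (v - 1)) % n
--     out = []
--     for r in range(n):
--         d = (r - start) % n
--         c = (k - d + n - 1) // n
--         if c > 0:
--             out += [attractions[r]] * c
--     return out
-- ===== Notes on version B (the rewrite author's own statement) =====
-- stated objective: alternative
-- what changed: Instead of materialising all k consecutive mod-n indices and sorting them, B computes for each attraction index r a closed-form count of how many of the k visits hit r and emits the output in index order (counting construction, no sort).
import Mathlib
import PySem

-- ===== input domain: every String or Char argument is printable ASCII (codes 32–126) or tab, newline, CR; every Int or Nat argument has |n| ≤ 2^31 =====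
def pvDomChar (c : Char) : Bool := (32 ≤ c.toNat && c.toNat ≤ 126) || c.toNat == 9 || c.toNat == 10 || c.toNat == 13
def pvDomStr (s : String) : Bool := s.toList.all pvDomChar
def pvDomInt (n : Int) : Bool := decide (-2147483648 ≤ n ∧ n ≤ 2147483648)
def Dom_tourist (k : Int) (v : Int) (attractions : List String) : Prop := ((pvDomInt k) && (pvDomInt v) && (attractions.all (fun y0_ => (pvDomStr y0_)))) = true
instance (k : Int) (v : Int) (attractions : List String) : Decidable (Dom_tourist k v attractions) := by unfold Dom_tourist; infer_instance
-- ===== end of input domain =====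

-- B replaces A's collect-then-comparison-sort of the k visited indices by a direct
-- counting construction over the attraction indices (objective: alternative, no sort).


-- ===== PORT A =====
def tourist (k : Int) (v : Int) (attractions : List String) : List String :=
  let n : Int := (attractions.length : Int)
  let start_attr_num : Int := PySem.Int.mod (k * (v - 1)) n
  -- while i < k: tmp_idx_list.append((i + start_attr_num) % n); i += 1
  let tmp_idx_list : List Int :=
    (PySem.List.pyRange 0 k 1).foldl
      (fun acc i => acc ++ [PySem.Int.mod (i + start_attr_num) n]) []
  let sortedIdx : List Int := PySem.List.sorted tmp_idx_list (fun x => x) false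
  -- for idx in tmp_idx_list: ret_list.append(attractions[idx])  (index always in range under Pre_)
  sortedIdx.foldl (fun acc idx => acc ++ [PySem.List.pyGetD attractions idx ""]) []

-- ===== PORT B =====
def tourist_alt (k : Int) (v : Int) (attractions : List String) : List String :=
  let n : Int := (attractions.length : Int)
  let start : Int := PySem.Int.mod (k * (v - 1)) n
  (PySem.List.pyRange 0 n 1).foldl
    (fun acc r =>
      let d : Int := PySem.Int.mod (r - start) n
      let c : Int := PySem.Int.floordiv (k - d + n - 1) n
      if 0 < c then acc ++ List.replicate c.toNat (PySem.List.pyGetD attractions r "") else acc)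
    []

-- ===== PRECONDITION & SPEC =====
-- Python A computes `% len(attractions)`: it raises ZeroDivisionError exactly when the list is empty.
def Pre_tourist (k : Int) (v : Int) (attractions : List String) : Prop := attractions ≠ []
instance (k : Int) (v : Int) (attractions : List String) : Decidable (Pre_tourist k v attractions) := by unfold Pre_tourist; infer_instance

def pvWitness_tourist : Int × Int × List String := (3, 2, ["a", "b"])

def Spec_tourist (k : Int) (v : Int) (attractions : List String) (out : List String) : Prop := out = tourist_alt k v attractions
instance (k : Int) (v : Int) (attractions : List String) (out : List String) : Decidable (Spec_tourist k v attractions out) := by unfold Spec_tourist; infer_instance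

-- ===== CLAIM (what is proved, stated in full; the proofs are below) =====
def Claim_equal_tourist : Prop := ∀ (k : Int) (v : Int) (attractions : List String), Dom_tourist k v attractions → Pre_tourist k v attractions → Spec_tourist k v attractions (tourist k v attractions)

-- ===== LEMMAS AND PROOFS =====

theorem pv_foldl_id {α β : Type} (l : List α) (init : β) :
    l.foldl (fun acc _ => acc) init = init := by
  induction l <;> simp_all

theorem pv_dvd_iff_mod_eq (k d n : Nat) (hd : d < n) : n ∣ (k + n - d) ↔ k % n = d := by
  constructor
  · rintro ⟨q, hq⟩
    rcases q with _ | q'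
    · omega
    · rw [Nat.mul_succ] at hq
      generalize hm : n * q' = m at hq
      have hk : k = m + d := by omega
      subst hk hm
      rw [Nat.add_comm, Nat.add_mul_mod_self_left, Nat.mod_eq_of_lt hd]
  · intro h
    refine ⟨k / n + 1, ?_⟩
    have := Nat.div_add_mod k n
    rw [Nat.mul_add, Nat.mul_one]
    omega

-- how often i % n = d for i < k
theorem pv_count_range_mod (n d : Nat) (hd : d < n) (k : Nat) :
    (List.range k).countP (fun i => i % n == d) = (k + n - 1 - d) / n := by
  induction k with
  | zero =>
    rw [List.range_zero, List.countP_nil, Nat.div_eq_of_lt (by omega : 0 + n - 1 - d < n)]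
  | succ k ih =>
    rw [List.range_succ, List.countP_append, ih]
    have h1 : k + 1 + n - 1 - d = (k + n - 1 - d) + 1 := by omega
    rw [h1, Nat.succ_div]
    have h2 : k + n - 1 - d + 1 = k + n - d := by omega
    rw [h2]
    by_cases h : k % n = d
    · rw [if_pos ((pv_dvd_iff_mod_eq k d n hd).mpr h)]
      simp [h]
    · rw [if_neg (fun hdvd => h ((pv_dvd_iff_mod_eq k d n hd).mp hdvd))]
      simp [h]

-- shifting a residue class: (i + s) % n = r  ↔  i % n = (r + n - s) % n
theorem pv_mod_shift (n s r i : Nat) (hn : 0 < n) (hs : s < n) (hr : r < n) :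
    (i + s) % n = r ↔ i % n = (r + n - s) % n := by
  have h0 : (i + s) % n = (i % n + s) % n := by rw [Nat.mod_add_mod]
  have hj : i % n < n := Nat.mod_lt _ hn
  have h1 : (i % n + s) % n = if i % n + s < n then i % n + s else i % n + s - n := by
    split
    · exact Nat.mod_eq_of_lt (by omega)
    · rw [Nat.mod_eq_sub_mod (by omega)]
      exact Nat.mod_eq_of_lt (by omega)
  have h2 : (r + n - s) % n = if r + n - s < n then r + n - s else r + n - s - n := by
    split
    · exact Nat.mod_eq_of_lt (by omega)
    · rw [Nat.mod_eq_sub_mod (by omega)]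
      exact Nat.mod_eq_of_lt (by omega)
  rw [h0, h1, h2]
  split_ifs <;> omega

-- the Nat-level sorted index list: for r = 0..m-1, (c r) copies of r
def pvBlocks (c : Nat → Nat) (m : Nat) : List Nat :=
  (List.range m).flatMap (fun r => List.replicate (c r) r)

theorem pv_blocks_succ (c : Nat → Nat) (m : Nat) :
    pvBlocks c (m + 1) = pvBlocks c m ++ List.replicate (c m) m := by
  unfold pvBlocks
  rw [List.range_succ, List.flatMap_append]
  simp

theorem pv_mem_blocks {c : Nat → Nat} {m x : Nat} (h : x ∈ pvBlocks c m) : x < m := by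
  unfold pvBlocks at h
  rw [List.mem_flatMap] at h
  obtain ⟨r, hr, hx⟩ := h
  rw [List.mem_range] at hr
  rw [List.eq_of_mem_replicate hx]
  exact hr

theorem pv_blocks_pairwise (c : Nat → Nat) (m : Nat) : (pvBlocks c m).Pairwise (· ≤ ·) := by
  induction m with
  | zero => simp [pvBlocks]
  | succ m ih =>
    rw [pv_blocks_succ]
    refine List.pairwise_append.mpr ⟨ih, ?_, ?_⟩
    · exact List.pairwise_replicate.mpr (Or.inr le_rfl)
    · intro x hx y hy
      rw [List.eq_of_mem_replicate hy]
      exact le_of_lt (pv_mem_blocks hx)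

theorem pv_count_blocks (c : Nat → Nat) (m x : Nat) :
    (pvBlocks c m).count x = if x < m then c x else 0 := by
  induction m with
  | zero => simp [pvBlocks]
  | succ m ih =>
    rw [pv_blocks_succ, List.count_append, ih, List.count_replicate]
    by_cases h : x = m
    · subst h
      simp
    · have hne : (m == x) = false := by simp; omega
      rw [hne]
      by_cases h2 : x < m
      · rw [if_pos h2, if_pos (by omega : x < m + 1)]
        simp
      · rw [if_neg h2, if_neg (by omega : ¬ x < m + 1)]
        simp

-- the per-residue multiplicity used by B, at the Nat level
def pvCnt (kk s n r : Nat) : Nat := (kk + n - 1 - (r + n - s) % n) / n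

-- the Nat index list A builds (before sorting)
theorem pv_perm_blocks (kk s n : Nat) (hn : 0 < n) (hs : s < n) :
    (pvBlocks (pvCnt kk s n) n).Perm ((List.range kk).map (fun i => (i + s) % n)) := by
  rw [List.perm_iff_count]
  intro x
  rw [pv_count_blocks, List.count_eq_countP, List.countP_map]
  by_cases hx : x < n
  · rw [if_pos hx]
    have hcong : ∀ i ∈ List.range kk,
        ((fun j => j == x) ∘ fun i => (i + s) % n) i = true ↔ (fun i => i % n == ((x + n - s) % n)) i = true := by
      intro i _
      simp only [Function.comp, beq_iff_eq]
      exact pv_mod_shift n s x i hn hs hx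
    rw [List.countP_congr hcong,
        pv_count_range_mod n ((x + n - s) % n) (Nat.mod_lt _ hn) kk]
    rfl
  · rw [if_neg hx, Eq.comm, List.countP_eq_zero]
    intro i _
    simp only [Function.comp, beq_iff_eq]
    intro h
    exact hx (h ▸ Nat.mod_lt _ hn)

-- the common closed form both ports are proved equal to
def pvOut (c : Nat → Nat) (n : Nat) (att : List String) : List String :=
  (List.range n).flatMap (fun r => List.replicate (c r) (att.getD r ""))

-- ===== VERDICT helper: the full equivalence =====
theorem pv_tourist_eq (k v : Int) (att : List String) (hne : att ≠ []) :
    tourist k v att = tourist_alt k v att := by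
  have hn : 0 < att.length := List.length_pos_of_ne_nil hne
  have hnpos : (0 : Int) < (att.length : Int) := by exact_mod_cast hn
  set n : Nat := att.length with hndef
  set s : Int := PySem.Int.mod (k * (v - 1)) (n : Int) with hsdef
  have hs_emod : s = (k * (v - 1)) % (n : Int) := PySem.Int.mod_eq_emod_of_pos hnpos
  have hs0 : 0 ≤ s := by rw [hs_emod]; exact Int.emod_nonneg _ (by omega)
  have hslt : s < (n : Int) := by rw [hs_emod]; exact Int.emod_lt_of_pos _ hnpos
  set s' : Nat := s.toNat with hs'def
  have hcast : (s' : Int) = s := Int.toNat_of_nonneg hs0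
  have hs'lt : s' < n := by omega
  -- the index→multiplicity computed by B, evaluated at a Nat index r < n
  have hdval : ∀ r : Nat, r < n →
      PySem.Int.mod ((r : Int) - s) (n : Int) = (((r + n - s') % n : Nat) : Int) := by
    intro r hr
    rw [PySem.Int.mod_eq_emod_of_pos hnpos, ← hcast]
    have h1 : (r : Int) - (s' : Int) + (n : Int) = ((r + n - s' : Nat) : Int) := by omega
    rw [← Int.add_emod_right ((r : Int) - (s' : Int)) (n : Int), h1, ← Int.natCast_mod]
  by_cases hk0 : 0 ≤ k
  · -- k ≥ 0 : both sides equal the closed form pvOut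
    set k' : Nat := k.toNat with hk'def
    have hkcast : (k' : Int) = k := Int.toNat_of_nonneg hk0
    have hcval : ∀ r : Nat, r < n →
        PySem.Int.floordiv (k - (((r + n - s') % n : Nat) : Int) + (n : Int) - 1) (n : Int)
          = ((pvCnt k' s' n r : Nat) : Int) := by
      intro r hr
      have hd : (r + n - s') % n < n := Nat.mod_lt _ hn
      have h1 : k - (((r + n - s') % n : Nat) : Int) + (n : Int) - 1
          = ((k' + n - 1 - (r + n - s') % n : Nat) : Int) := by omega
      rw [h1, PySem.Int.floordiv_natCast]
      rfl
    have hA : tourist k v att = pvOut (pvCnt k' s' n) n att := by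
      simp only [tourist]
      rw [← hndef, ← hsdef, ← hkcast, PySem.List.pyRange_zero_natCast]
      rw [PySem.List.foldl_append_singleton_eq_map (fun i => PySem.Int.mod (i + s) (n : Int)),
          List.nil_append, List.map_map]
      have hmap : ((fun i => PySem.Int.mod (i + s) (n : Int)) ∘ fun i : Nat => (i : Int))
          = (fun j : Nat => (j : Int)) ∘ (fun i : Nat => (i + s') % n) := by
        funext i
        simp only [Function.comp]
        rw [PySem.Int.mod_eq_emod_of_pos hnpos, ← hcast]
        have h1 : (i : Int) + (s' : Int) = ((i + s' : Nat) : Int) := by omega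
        rw [h1, ← Int.natCast_mod]
      rw [hmap, ← List.map_map]
      have hsorted : PySem.List.sorted
            (((List.range k').map (fun i => (i + s') % n)).map (fun j : Nat => (j : Int)))
            (fun x => x) false
          = (pvBlocks (pvCnt k' s' n) n).map (fun j : Nat => (j : Int)) := by
        apply PySem.List.sorted_id_eq_of_perm_of_pairwise
        · exact (pv_perm_blocks k' s' n hn hs'lt).map _
        · rw [List.pairwise_map]
          exact (pv_blocks_pairwise _ _).imp (by exact_mod_cast · )
      rw [hsorted, PySem.List.foldl_append_singleton_eq_map (fun idx => PySem.List.pyGetD att idx ""),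
          List.nil_append, List.map_map]
      have hmap3 : ((fun idx => PySem.List.pyGetD att idx "") ∘ fun j : Nat => (j : Int))
          = fun r : Nat => att.getD r "" := by
        funext r
        simp only [Function.comp]
        exact PySem.List.pyGetD_natCast att r ""
      rw [hmap3]
      unfold pvBlocks pvOut
      rw [List.map_flatMap]
      apply List.flatMap_congr
      intro r _
      rw [List.map_replicate]
    have hB : tourist_alt k v att = pvOut (pvCnt k' s' n) n att := by
      simp only [tourist_alt]
      rw [← hndef, ← hsdef, PySem.List.pyRange_zero_natCast, List.foldl_map]
      have hcong : ∀ (acc : List String), ∀ r ∈ List.range n,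
          (fun acc (r : Nat) =>
            if 0 < PySem.Int.floordiv (k - PySem.Int.mod ((r : Int) - s) (n : Int) + (n : Int) - 1) (n : Int)
            then acc ++ List.replicate (PySem.Int.floordiv (k - PySem.Int.mod ((r : Int) - s) (n : Int) + (n : Int) - 1) (n : Int)).toNat
                   (PySem.List.pyGetD att (r : Int) "")
            else acc) acc r
          = acc ++ List.replicate (pvCnt k' s' n r) (att.getD r "") := by
        intro acc r hr
        rw [List.mem_range] at hr
        beta_reduce
        rw [hdval r hr, hcval r hr, PySem.List.pyGetD_natCast]
        by_cases hc : 0 < pvCnt k' s' n r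
        · rw [if_pos (by exact_mod_cast hc), Int.toNat_natCast]
        · rw [if_neg (by exact_mod_cast hc)]
          have h0 : pvCnt k' s' n r = 0 := by omega
          rw [h0, List.replicate_zero, List.append_nil]
      rw [PySem.List.foldl_congr_mem _ _ _ _ hcong, PySem.List.foldl_append_eq_flatMap,
          List.nil_append]
      rfl
    rw [hA, hB]
  · -- k < 0 : A builds and sorts the empty list; every count in B is non-positive
    have hA : tourist k v att = [] := by
      simp only [tourist]
      have hrange : PySem.List.pyRange 0 k 1 = [] := by
        rw [List.eq_nil_iff_forall_not_mem]
        intro x hx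
        rw [PySem.List.mem_pyRange_one] at hx
        omega
      rw [hrange, List.foldl_nil,
          (PySem.List.sorted_eq_nil_iff [] (fun x : Int => x) false).mpr rfl, List.foldl_nil]
    have hB : tourist_alt k v att = [] := by
      simp only [tourist_alt]
      rw [← hndef, ← hsdef]
      have hcong : ∀ (acc : List String), ∀ r ∈ PySem.List.pyRange 0 (n : Int) 1,
          (fun acc (r : Int) =>
            if 0 < PySem.Int.floordiv (k - PySem.Int.mod (r - s) (n : Int) + (n : Int) - 1) (n : Int)
            then acc ++ List.replicate (PySem.Int.floordiv (k - PySem.Int.mod (r - s) (n : Int) + (n : Int) - 1) (n : Int)).toNat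
                   (PySem.List.pyGetD att r "")
            else acc) acc r
          = acc := by
        intro acc r hr
        rw [PySem.List.mem_pyRange_one] at hr
        have hd0 : 0 ≤ PySem.Int.mod (r - s) (n : Int) := by
          rw [PySem.Int.mod_eq_emod_of_pos hnpos]
          exact Int.emod_nonneg _ (by omega)
        have hlt : PySem.Int.floordiv (k - PySem.Int.mod (r - s) (n : Int) + (n : Int) - 1) (n : Int) < 1 := by
          rw [PySem.Int.floordiv_lt_iff_lt_mul hnpos]
          omega
        beta_reduce
        rw [if_neg (by omega)]
      rw [PySem.List.foldl_congr_mem _ _ _ _ hcong, pv_foldl_id]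
    rw [hA, hB]

-- ===== VERDICT (by name: the statement is the Claim_ definition above) =====
theorem tourist_spec : Claim_equal_tourist := by
  intro k v attractions _hdom hpre
  unfold Spec_tourist
  exact pv_tourist_eq k v attractions hpre
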